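-- pv_equiv track=rewrite | github.com/FitxWD/Backend | firebase-db-test/src/db_client.py | validate_registration_data
-- ===== SOURCE A (Python) =====
-- def validate_registration_data(full_name: str, email: str, password: str) -> tuple[bool, str]:
--     """Validate registration form data"""
--     # Check full name
--     if not full_name or len(full_name.strip()) == 0:
--         return False, "Full name is required"
--
--     # Check email format
--     if not email or "@" not in email or "." not in email.split("@")[-1]:
--         return False, "Valid email address is required"
--
--     # Check password strength
--     if not password or len(password) < 8:
--         return False, "Password must be at least 8 characters long"
--
--     if not any(c.isupper() for c in password):
--         return False, "Password must contain at least one uppercase letter"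
--
--     if not any(c.islower() for c in password):
--         return False, "Password must contain at least one lowercase letter"
--
--     if not any(c.isdigit() for c in password):
--         return False, "Password must contain at least one number"
--
--     return True, "Valid"
-- ===== SOURCE B (Python) =====
-- def validate_registration_data(full_name: str, email: str, password: str) -> tuple[bool, str]:
--     """Validate registration form data (single-pass password scan)"""
--     if not full_name or len(full_name.strip()) == 0:
--         return False, "Full name is required"
--
--     if not email or "@" not in email or "." not in email.split("@")[-1]:
--         return False, "Valid email address is required"
--
--     if not password or len(password) < 8:
--         return False, "Password must be at least 8 characters long"
--
--     has_upper = has_lower = has_digit = False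
--     for c in password:
--         if has_upper and has_lower and has_digit:
--             break
--         has_upper = has_upper or c.isupper()
--         has_lower = has_lower or c.islower()
--         has_digit = has_digit or c.isdigit()
--
--     if not has_upper:
--         return False, "Password must contain at least one uppercase letter"
--     if not has_lower:
--         return False, "Password must contain at least one lowercase letter"
--     if not has_digit:
--         return False, "Password must contain at least one number"
--     return True, "Valid"
-- ===== Notes on version B (the rewrite author's own statement) =====
-- stated objective: alternative
-- what changed: The three separate any() scans over the password are replaced by one single pass that accumulates has_upper/has_lower/has_digit flags (with an early break once all three hold); the name/email/length guards are unchanged.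
import Mathlib
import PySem

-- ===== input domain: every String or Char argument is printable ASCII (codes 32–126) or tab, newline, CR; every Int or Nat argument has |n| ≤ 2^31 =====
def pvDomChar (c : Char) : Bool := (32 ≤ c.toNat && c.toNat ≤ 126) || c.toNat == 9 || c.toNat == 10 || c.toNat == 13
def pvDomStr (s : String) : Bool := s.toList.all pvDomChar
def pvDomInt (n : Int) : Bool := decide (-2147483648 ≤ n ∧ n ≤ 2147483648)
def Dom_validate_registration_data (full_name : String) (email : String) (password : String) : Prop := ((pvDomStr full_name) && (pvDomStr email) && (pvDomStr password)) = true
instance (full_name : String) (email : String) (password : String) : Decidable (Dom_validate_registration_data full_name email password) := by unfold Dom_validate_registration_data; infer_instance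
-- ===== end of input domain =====

-- ===== PORT A =====
-- B changes: single accumulating pass over the password instead of three any() scans (alternative decomposition, same cost).
def validate_registration_data (full_name : String) (email : String) (password : String) : Bool × String :=
  if full_name = "" ∨ PySem.Str.len (PySem.Str.strip full_name) = 0 then
    (false, "Full name is required")
  else if email = "" ∨ ¬ PySem.Str.isIn "@" email
      ∨ ¬ PySem.Str.isIn "." (PySem.List.pyGetD ((PySem.Str.split? email "@").getD []) (-1) "") then
    (false, "Valid email address is required")
  else if password = "" ∨ PySem.Str.len password < 8 then
    (false, "Password must be at least 8 characters long")
  else if ¬ password.toList.any (fun c => PySem.Chars.isupper c) then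
    (false, "Password must contain at least one uppercase letter")
  else if ¬ password.toList.any (fun c => PySem.Chars.islower c) then
    (false, "Password must contain at least one lowercase letter")
  else if ¬ password.toList.any (fun c => PySem.Chars.isdigit c) then
    (false, "Password must contain at least one number")
  else (true, "Valid")

-- ===== PORT B =====
-- single pass over the password characters, breaking once all three flags are set (Source B's for-loop)
def pvScanPw : List Char → Bool → Bool → Bool → Bool × Bool × Bool
  | [], u, l, d => (u, l, d)
  | c :: cs, u, l, d =>
    if u && l && d then (u, l, d)
    else pvScanPw cs (u || PySem.Chars.isupper c) (l || PySem.Chars.islower c) (d || PySem.Chars.isdigit c)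

def validate_registration_data_alt (full_name : String) (email : String) (password : String) : Bool × String :=
  if full_name = "" ∨ PySem.Str.len (PySem.Str.strip full_name) = 0 then
    (false, "Full name is required")
  else if email = "" ∨ ¬ PySem.Str.isIn "@" email
      ∨ ¬ PySem.Str.isIn "." (PySem.List.pyGetD ((PySem.Str.split? email "@").getD []) (-1) "") then
    (false, "Valid email address is required")
  else if password = "" ∨ PySem.Str.len password < 8 then
    (false, "Password must be at least 8 characters long")
  else
    let r := pvScanPw password.toList false false false
    if ¬ r.1 then (false, "Password must contain at least one uppercase letter")
    else if ¬ r.2.1 then (false, "Password must contain at least one lowercase letter")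
    else if ¬ r.2.2 then (false, "Password must contain at least one number")
    else (true, "Valid")

-- ===== PRECONDITION & SPEC =====
def Spec_validate_registration_data (full_name : String) (email : String) (password : String) (out : Bool × String) : Prop := out = validate_registration_data_alt full_name email password
instance (full_name : String) (email : String) (password : String) (out : Bool × String) : Decidable (Spec_validate_registration_data full_name email password out) := by unfold Spec_validate_registration_data; infer_instance

-- ===== CLAIM (what is proved, stated in full; the proofs are below) =====
def Claim_equal_validate_registration_data : Prop := ∀ (full_name : String) (email : String) (password : String), Dom_validate_registration_data full_name email password → Spec_validate_registration_data full_name email password (validate_registration_data full_name email password)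

-- ===== LEMMAS AND PROOFS =====
theorem pvScanPw_eq (cs : List Char) : ∀ u l d : Bool,
    pvScanPw cs u l d =
      (u || cs.any (fun c => PySem.Chars.isupper c),
       l || cs.any (fun c => PySem.Chars.islower c),
       d || cs.any (fun c => PySem.Chars.isdigit c)) := by
  induction cs with
  | nil => intro u l d; simp [pvScanPw]
  | cons c cs ih =>
    intro u l d
    cases u <;> cases l <;> cases d <;>
      simp [pvScanPw, ih, List.any_cons]

-- ===== VERDICT (by name: the statement is the Claim_ definition above) =====
theorem validate_registration_data_spec : Claim_equal_validate_registration_data := by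
  intro full_name email password _
  unfold Spec_validate_registration_data validate_registration_data validate_registration_data_alt
  rw [pvScanPw_eq]
  split_ifs <;> simp_all
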